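-- pv_equiv track=rewrite | github.com/siorai/AdventOfCode | Python3.10/2021/day3.py | remove_rows
-- ===== SOURCE A (Python) =====
-- def remove_rows(existing_list: list, column: int, ) -> list:
--     new_list = []
--     zeros = 0
--     ones = 0
--     lookingfor = ''
--     for k in range(len(existing_list)):
--         if existing_list[k][column] == '0':
--             zeros += 1
--         else:
--             ones += 1
--     if zeros > ones:
--         lookingfor = '0'
--     else:
--         lookingfor = '1'
--     for k in range(len(existing_list)):
--         if existing_list[k][column] == lookingfor:
--             new_list.append(existing_list[k])
--     return new_list
-- ===== SOURCE B (Python) =====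
-- def remove_rows(existing_list: list, column: int, ) -> list:
--     groups = {}
--     for row in existing_list:
--         groups.setdefault(row[column], []).append(row)
--     zeros = groups.get('0', [])
--     if 2 * len(zeros) > len(existing_list):
--         return zeros
--     return groups.get('1', [])
-- ===== Notes on version B (the rewrite author's own statement) =====
-- stated objective: alternative
-- what changed: Groups rows by their column character into a dict in one pass and then selects the '0' group if it is a strict majority, else the '1' group, replacing A's counting pass followed by a second filtering pass; no speed claim.
import Mathlib
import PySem

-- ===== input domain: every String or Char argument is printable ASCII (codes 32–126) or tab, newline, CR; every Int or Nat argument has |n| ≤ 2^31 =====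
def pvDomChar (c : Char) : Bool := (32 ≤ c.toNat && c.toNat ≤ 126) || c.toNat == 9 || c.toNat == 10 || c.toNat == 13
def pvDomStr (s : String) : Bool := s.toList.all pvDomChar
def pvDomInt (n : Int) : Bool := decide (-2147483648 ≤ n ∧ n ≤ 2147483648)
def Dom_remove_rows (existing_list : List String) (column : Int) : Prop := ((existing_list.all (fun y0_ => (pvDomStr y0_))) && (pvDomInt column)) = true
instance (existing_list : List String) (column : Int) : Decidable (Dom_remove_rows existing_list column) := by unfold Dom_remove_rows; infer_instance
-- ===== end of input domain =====

-- B groups rows by their column character into a dict in one pass and selects the '0' group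
-- if it is a strict majority, else the '1' group (alternative decomposition, same cost).

-- ===== PORT A =====
-- count zeros/ones over the column, then a second filtering pass for the majority character
def remove_rows (existing_list : List String) (column : Int) : List String :=
  let counts := existing_list.foldl
    (fun (zo : Int × Int) s =>
      if PySem.Str.pyGet? s column = some '0' then (zo.1 + 1, zo.2) else (zo.1, zo.2 + 1))
    (0, 0)
  let lookingfor : Char := if counts.1 > counts.2 then '0' else '1'
  existing_list.foldl
    (fun acc s => if PySem.Str.pyGet? s column = some lookingfor then acc ++ [s] else acc) []

-- ===== PORT B =====
-- one pass grouping rows by their column character, then pick the '0' group iff it is a strict majority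
def remove_rows_alt (existing_list : List String) (column : Int) : List String :=
  let groups := existing_list.foldl
    (fun (d : PySem.Dict (Option Char) (List String)) s =>
      d.modify (PySem.Str.pyGet? s column) [] (· ++ [s]))
    PySem.Dict.empty
  let zeros := groups.getD (some '0') []
  if 2 * zeros.length > existing_list.length then zeros
  else groups.getD (some '1') []

-- ===== PRECONDITION & SPEC =====
-- Pre_ excludes exactly the inputs where Python A raises IndexError: a row for which `column`
-- is not a valid index of the row string.
def Pre_remove_rows (existing_list : List String) (column : Int) : Prop :=
  ∀ s ∈ existing_list, PySem.Raise.InRange s.toList.length column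
instance (existing_list : List String) (column : Int) : Decidable (Pre_remove_rows existing_list column) := by unfold Pre_remove_rows; infer_instance

def pvWitness_remove_rows : List String × Int := (["01", "10", "11"], 0)

def Spec_remove_rows (existing_list : List String) (column : Int) (out : List String) : Prop := out = remove_rows_alt existing_list column
instance (existing_list : List String) (column : Int) (out : List String) : Decidable (Spec_remove_rows existing_list column out) := by unfold Spec_remove_rows; infer_instance

-- ===== CLAIM =====
def Claim_equal_remove_rows : Prop := ∀ (existing_list : List String) (column : Int), Dom_remove_rows existing_list column → Pre_remove_rows existing_list column → Spec_remove_rows existing_list column (remove_rows existing_list column)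

-- ===== LEMMAS AND PROOFS =====

-- A's counting loop computes the lengths of the two column-character classes, for any start values.
theorem counts_eq_filter_lengths (l : List String) (p : String → Prop) [DecidablePred p] (a b : Int) :
    l.foldl (fun (zo : Int × Int) s =>
        if p s then (zo.1 + 1, zo.2) else (zo.1, zo.2 + 1)) (a, b)
      = (a + (l.filter (fun s => decide (p s))).length, b + (l.filter (fun s => !decide (p s))).length) := by
  induction l generalizing a b with
  | nil => simp
  | cons x xs ih =>
    simp only [List.foldl_cons, List.filter_cons]
    by_cases h : p x <;> simp [h, ih] <;> ring

-- B's grouping loop: looking up key k in the built dict yields the rows whose key is k, in order.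
theorem group_getD_eq_filter (l : List String) (key : String → Option Char) (k : Option Char)
    (d : PySem.Dict (Option Char) (List String)) :
    (l.foldl (fun d s => d.modify (key s) [] (· ++ [s])) d).getD k []
      = d.getD k [] ++ (l.filter (fun s => key s == k)) := by
  induction l generalizing d with
  | nil => simp
  | cons x xs ih =>
    simp only [List.foldl_cons, List.filter_cons]
    by_cases h : key x = k
    · simp [ih, h]
    · rw [ih]
      have hne : k ≠ key x := fun hh => h hh.symm
      simp [PySem.Dict.getD_modify, hne, h]

-- A's filtering loop appends exactly the rows satisfying the test, in order.
theorem foldl_if_append_eq_filter (l : List String) (p : String → Prop) [DecidablePred p] (a : List String) :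
    l.foldl (fun acc s => if p s then acc ++ [s] else acc) a
      = a ++ l.filter (fun s => decide (p s)) := by
  induction l generalizing a with
  | nil => simp
  | cons x xs ih =>
    simp only [List.foldl_cons, List.filter_cons]
    by_cases h : p x <;> simp [h, ih]

-- ===== VERDICT =====
theorem remove_rows_spec : Claim_equal_remove_rows := by
  intro l c _ _
  unfold Spec_remove_rows remove_rows remove_rows_alt
  dsimp only
  rw [counts_eq_filter_lengths l (fun s => PySem.Str.pyGet? s c = some '0') 0 0]
  rw [group_getD_eq_filter l (fun s => PySem.Str.pyGet? s c) (some '0') PySem.Dict.empty,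
      group_getD_eq_filter l (fun s => PySem.Str.pyGet? s c) (some '1') PySem.Dict.empty]
  simp only [PySem.Dict.getD_empty, List.nil_append, Int.zero_add]
  have hbeq0 : (l.filter (fun s => PySem.Str.pyGet? s c == some '0'))
      = (l.filter (fun s => decide (PySem.Str.pyGet? s c = some '0'))) := by
    apply List.filter_congr; intro x _
    cases hh : PySem.Str.pyGet? x c == some '0' <;> simp_all
  have hbeq1 : (l.filter (fun s => PySem.Str.pyGet? s c == some '1'))
      = (l.filter (fun s => decide (PySem.Str.pyGet? s c = some '1'))) := by
    apply List.filter_congr; intro x _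
    cases hh : PySem.Str.pyGet? x c == some '1' <;> simp_all
  have hsum := List.length_eq_length_filter_add (l := l)
    (fun s => decide (PySem.Str.pyGet? s c = some '0'))
  have hiff :
      (((l.filter (fun s => decide (PySem.Str.pyGet? s c = some '0'))).length : Int)
          > ((l.filter (fun s => !decide (PySem.Str.pyGet? s c = some '0'))).length : Int))
        ↔ 2 * (l.filter (fun s => PySem.Str.pyGet? s c == some '0')).length > l.length := by
    rw [hbeq0]; omega
  by_cases hgt :
      ((l.filter (fun s => decide (PySem.Str.pyGet? s c = some '0'))).length : Int)
        > ((l.filter (fun s => !decide (PySem.Str.pyGet? s c = some '0'))).length : Int)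
  · rw [if_pos hgt, if_pos (hiff.mp hgt)]
    rw [foldl_if_append_eq_filter l (fun s => PySem.Str.pyGet? s c = some '0') []]
    rw [hbeq0, List.nil_append]
  · rw [if_neg hgt, if_neg (fun h => hgt (hiff.mpr h))]
    rw [foldl_if_append_eq_filter l (fun s => PySem.Str.pyGet? s c = some '1') []]
    rw [hbeq1, List.nil_append]
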